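-- pv_equiv track=rewrite | github.com/micanipho/Practice-test | practice.py | sum_numbers_until_zero
-- ===== SOURCE A (Python) =====
-- def sum_numbers_until_zero(nums: list):
--
--     """
--     Calculate the sum of numbers in a list until a zero is encountered.
--
--     Parameters:
--     nums (list): A list of integers.
--
--     Returns:
--     int: The sum of integers in the list up to (but not including) the first zero.
--     """
--
--     total = 0
--     for i in range(len(nums)):
--         if nums[i] == 0:
--             break
--         else:
--             total += nums[i]
--     return total
-- ===== SOURCE B (Python) =====
-- def sum_numbers_until_zero(nums: list):
--     # Locate the first zero, then compute the whole-list sum and subtract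
--     # the sum of the suffix starting at that zero (staged passes, no break).
--     try:
--         i = nums.index(0)
--     except ValueError:
--         return sum(nums)
--     return sum(nums) - sum(nums[i:])
-- ===== Notes on version B (the rewrite author's own statement) =====
-- stated objective: alternative
-- what changed: Instead of one accumulating pass that breaks at the first zero, B first locates the first zero with list.index and then returns sum(nums) - sum(nums[i:]): a search pass plus two full sums combined by subtraction.
import Mathlib
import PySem

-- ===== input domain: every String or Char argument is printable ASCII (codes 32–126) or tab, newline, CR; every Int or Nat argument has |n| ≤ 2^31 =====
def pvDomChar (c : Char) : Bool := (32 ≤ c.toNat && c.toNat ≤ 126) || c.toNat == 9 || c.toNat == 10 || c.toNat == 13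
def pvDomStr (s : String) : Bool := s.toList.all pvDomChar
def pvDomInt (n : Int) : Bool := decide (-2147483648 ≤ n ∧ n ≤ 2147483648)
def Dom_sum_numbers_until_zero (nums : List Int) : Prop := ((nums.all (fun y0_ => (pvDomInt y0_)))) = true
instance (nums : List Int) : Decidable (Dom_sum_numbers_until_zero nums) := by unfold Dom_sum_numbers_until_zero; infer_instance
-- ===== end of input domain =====

-- B locates the first zero with list.index and returns sum(nums) - sum(nums[i:]) (search + two sums) instead of A's accumulate-until-break loop; same cost.


-- ===== PORT A =====
-- loop: 'for i in range(len(nums)): if nums[i]==0: break else total += nums[i]'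
def sumLoopA : List Int → Int → Int
  | [], total => total
  | x :: rest, total => if x == 0 then total else sumLoopA rest (total + x)

def sum_numbers_until_zero (nums : List Int) : Int := sumLoopA nums 0

-- ===== PORT B =====
-- B: i = nums.index(0) (none = ValueError → return sum(nums)); else sum(nums) - sum(nums[i:])
def sum_numbers_until_zero_alt (nums : List Int) : Int :=
  match PySem.List.index? nums 0 with
  | none => nums.foldl (· + ·) 0
  | some i => nums.foldl (· + ·) 0 - (PySem.List.slice nums (some (i : Int)) none).foldl (· + ·) 0

-- ===== PRECONDITION & SPEC =====
def Spec_sum_numbers_until_zero (nums : List Int) (out : Int) : Prop := out = sum_numbers_until_zero_alt nums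
instance (nums : List Int) (out : Int) : Decidable (Spec_sum_numbers_until_zero nums out) := by unfold Spec_sum_numbers_until_zero; infer_instance

-- ===== CLAIM =====
def Claim_equal_sum_numbers_until_zero : Prop := ∀ (nums : List Int), Dom_sum_numbers_until_zero nums → Spec_sum_numbers_until_zero nums (sum_numbers_until_zero nums)

-- ===== LEMMAS AND PROOFS =====
theorem foldl_add_shift (l : List Int) (t : Int) :
    l.foldl (· + ·) t = t + l.foldl (· + ·) 0 := by
  induction l generalizing t with
  | nil => simp
  | cons x rest ih => simp only [List.foldl]; rw [ih (t + x), ih (0 + x)]; ring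

theorem sumLoopA_eq (nums : List Int) (t : Int) :
    sumLoopA nums t = (nums.takeWhile (fun x => x ≠ 0)).foldl (· + ·) t := by
  induction nums generalizing t with
  | nil => rfl
  | cons x rest ih =>
    simp only [sumLoopA, List.takeWhile]
    by_cases h : x = 0
    · simp [h]
    · simp [h, ih]

theorem takeWhile_pre (pre suf : List Int) (h : (0 : Int) ∉ pre) :
    (pre ++ 0 :: suf).takeWhile (fun x => x ≠ 0) = pre := by
  induction pre with
  | nil => simp [List.takeWhile]
  | cons x rest ih =>
    simp only [List.mem_cons, not_or] at h
    have hx : x ≠ 0 := fun e => h.1 e.symm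
    rw [List.cons_append, List.takeWhile_cons_of_pos (by simp [hx]), ih h.2]

-- ===== VERDICT =====
theorem sum_numbers_until_zero_spec : Claim_equal_sum_numbers_until_zero := by
  intro nums _
  unfold Spec_sum_numbers_until_zero sum_numbers_until_zero sum_numbers_until_zero_alt
  rw [sumLoopA_eq]
  cases hidx : PySem.List.index? nums 0 with
  | none =>
    dsimp only
    have h0 : (0 : Int) ∉ nums := (PySem.List.index?_eq_none_iff nums 0).1 hidx
    rw [List.takeWhile_eq_self_iff.2 (by intro x hx; simp; rintro rfl; exact h0 hx)]
  | some k =>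
    obtain ⟨pre, suf, hsplit, hlen, hpre⟩ := (PySem.List.index?_eq_some_iff nums 0 k).1 hidx
    subst hsplit; subst hlen
    dsimp only
    rw [takeWhile_pre pre suf hpre]
    rw [PySem.List.slice_from_natCast, List.drop_left]
    rw [List.foldl_append, foldl_add_shift (0 :: suf)]
    ring
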